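-- pv_equiv track=rewrite | github.com/field-4d/cloud | field4d-statdeck/test_data/test_anova_api_batching_scenario8_only.py | split_data_by_days
-- ===== SOURCE A (Python) =====
-- def split_data_by_days(data, days_per_batch=7):
--     """
--     Split data into batches by days.
--     Args:
--         data (list): List of data dictionaries.
--         days_per_batch (int): Number of days per batch.
--     Returns:
--         list: List of data batches.
--     """
--     # Group data by date
--     date_groups = {}
--     for item in data:
--         date = item['timestamp'].split()[0]  # Extract date part
--         if date not in date_groups:
--             date_groups[date] = []
--         date_groups[date].append(item)
--
--     # Sort dates
--     sorted_dates = sorted(date_groups.keys())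
--
--     # Create batches
--     batches = []
--     current_batch = []
--     current_dates = set()
--
--     for date in sorted_dates:
--         current_batch.extend(date_groups[date])
--         current_dates.add(date)
--
--         if len(current_dates) >= days_per_batch:
--             batches.append(current_batch)
--             current_batch = []
--             current_dates = set()
--
--     # Add remaining data
--     if current_batch:
--         batches.append(current_batch)
--
--     return batches
-- ===== SOURCE B (Python) =====
-- def split_data_by_days(data, days_per_batch=7):
--     """Same result as A: per-date runs in sorted date order, concatenated in
--     fixed-size chunks of days (chunk size max(days_per_batch, 1))."""
--     dates = sorted({item['timestamp'].split()[0] for item in data})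
--     runs = [[it for it in data if it['timestamp'].split()[0] == d] for d in dates]
--     k = max(days_per_batch, 1)
--     batches = []
--     while runs:
--         head, runs = runs[:k], runs[k:]
--         batches.append([x for r in head for x in r])
--     return batches
-- ===== Notes on version B (the rewrite author's own statement) =====
-- stated objective: simpler
-- what changed: Replaces A's dict accumulator plus set-counting flush loop with sorted distinct dates, one filter per date to build the runs, and slicing the run list into chunks of max(days_per_batch,1).
import Mathlib
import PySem

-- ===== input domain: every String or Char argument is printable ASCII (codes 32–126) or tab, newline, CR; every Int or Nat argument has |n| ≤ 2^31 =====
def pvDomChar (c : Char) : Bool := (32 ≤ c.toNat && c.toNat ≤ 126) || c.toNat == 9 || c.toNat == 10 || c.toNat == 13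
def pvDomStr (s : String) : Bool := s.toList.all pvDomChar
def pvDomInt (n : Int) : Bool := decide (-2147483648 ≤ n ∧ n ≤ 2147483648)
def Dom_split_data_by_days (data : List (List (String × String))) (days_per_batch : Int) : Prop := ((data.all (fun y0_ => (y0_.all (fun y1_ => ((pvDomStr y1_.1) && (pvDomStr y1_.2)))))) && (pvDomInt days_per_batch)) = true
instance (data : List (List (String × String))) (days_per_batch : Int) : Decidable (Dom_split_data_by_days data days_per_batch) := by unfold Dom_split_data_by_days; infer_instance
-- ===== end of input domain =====

-- B replaces A's dict accumulator and set-counting flush loop by sorted distinct dates,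
-- one per-date filter pass, and slicing the run list into fixed-size chunks (objective: simpler).

-- item['timestamp'].split()[0]  (shared key extraction; the .getD/.headD defaults are
-- never reached inside Pre_, where the key exists and the split is nonempty)
def pvKey (item : List (String × String)) : String :=
  ((PySem.Str.split₀ ((PySem.Dict.mk item).getD "timestamp" "")).headD "")

-- ===== PORT A =====
def split_data_by_days (data : List (List (String × String))) (days_per_batch : Int) : List (List (List (String × String))) :=
  -- date_groups = {}; for item in data: ... append
  let dg : PySem.Dict String (List (List (String × String))) :=
    data.foldl (fun dg item =>
      let date := pvKey item
      let dg := if dg.contains date then dg else dg.insert date []   -- if date not in date_groups: date_groups[date] = []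
      dg.modify date [] (fun l => l ++ [item]))                      -- date_groups[date].append(item)
      (PySem.Dict.mk [])
  -- sorted_dates = sorted(date_groups.keys())
  let sorted_dates := PySem.List.sorted dg.keys (fun d => d)
  -- flush loop over (batches, current_batch, current_dates)
  let st := sorted_dates.foldl
    (fun (st : List (List (List (String × String))) × List (List (String × String)) × PySem.Set String) date =>
      let cb := st.2.1 ++ dg.getD date []                            -- current_batch.extend(date_groups[date])
      let cs := PySem.Set.add st.2.2 date                            -- current_dates.add(date)
      if days_per_batch ≤ (cs.length : Int)                          -- len(current_dates) >= days_per_batch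
      then (st.1 ++ [cb], [], PySem.Set.empty) else (st.1, cb, cs))
    ([], [], PySem.Set.empty)
  if st.2.1.isEmpty then st.1 else st.1 ++ [st.2.1]                  -- if current_batch: batches.append(...)

-- ===== PORT B =====
-- while runs: head, runs = runs[:k], runs[k:]; batches.append(flatten head)
-- (runs[:k]/runs[k:] with k = max(days_per_batch,1) ≥ 1 are exactly take/drop;
--  (g::rs).drop k is written rs.drop (k-1), equal for k ≥ 1)
def pvChunk (k : Nat) : List (List (List (String × String))) → List (List (List (String × String)))
  | [] => []
  | g :: rs => ((g :: rs).take k).flatten :: pvChunk k (rs.drop (k - 1))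
termination_by rs => rs.length
decreasing_by simp [List.length_drop]

def split_data_by_days_alt (data : List (List (String × String))) (days_per_batch : Int) : List (List (List (String × String))) :=
  let dates := PySem.List.sorted (PySem.Set.ofList (data.map pvKey)) (fun d => d)
  let runs := dates.map (fun d => data.filter (fun it => pvKey it == d))
  pvChunk (max days_per_batch 1).toNat runs

-- ===== PRECONDITION & SPEC =====
-- excludes only inputs where A raises: an item without a 'timestamp' key (KeyError)
-- or whose timestamp is all whitespace/empty, so .split()[0] is an IndexError
def Pre_split_data_by_days (data : List (List (String × String))) (days_per_batch : Int) : Prop :=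
  ∀ item ∈ data, (((PySem.Dict.mk item).get? "timestamp").map
    (fun s => !(PySem.Str.split₀ s).isEmpty)).getD false = true
instance (data : List (List (String × String))) (days_per_batch : Int) : Decidable (Pre_split_data_by_days data days_per_batch) := by unfold Pre_split_data_by_days; infer_instance

def pvWitness_split_data_by_days : (List (List (String × String))) × Int :=
  ([[("timestamp", "2024-01-01 10:00"), ("v", "1")], [("timestamp", "2024-01-02 11:00")]], 7)

def Spec_split_data_by_days (data : List (List (String × String))) (days_per_batch : Int) (out : List (List (List (String × String)))) : Prop := out = split_data_by_days_alt data days_per_batch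
instance (data : List (List (String × String))) (days_per_batch : Int) (out : List (List (List (String × String)))) : Decidable (Spec_split_data_by_days data days_per_batch out) := by unfold Spec_split_data_by_days; infer_instance

-- ===== CLAIM (what is proved, stated in full; the proofs are below) =====
def Claim_equal_split_data_by_days : Prop := ∀ (data : List (List (String × String))) (days_per_batch : Int), Dom_split_data_by_days data days_per_batch → Pre_split_data_by_days data days_per_batch → Spec_split_data_by_days data days_per_batch (split_data_by_days data days_per_batch)

-- ===== LEMMAS AND PROOFS =====

-- A's "if absent insert []; then append" step is one Dict.modify
theorem pvFoldA_eq (data : List (List (String × String))) :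
    data.foldl (fun dg item =>
      let date := pvKey item
      let dg := if dg.contains date then dg else dg.insert date []
      dg.modify date [] (fun l => l ++ [item])) (PySem.Dict.mk [])
    = data.foldl (fun dg item => dg.modify (pvKey item) [] (fun l => l ++ [item]))
        (PySem.Dict.mk []) := by
  have h : (fun (dg : PySem.Dict String (List (List (String × String)))) item =>
      let date := pvKey item
      let dg := if dg.contains date then dg else dg.insert date []
      dg.modify date [] (fun l => l ++ [item]))
      = fun dg item => dg.modify (pvKey item) [] (fun l => l ++ [item]) := by
    funext dg item
    by_cases h : dg.contains (pvKey item)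
    · simp [h]
    · simp only [h, Bool.false_eq_true, if_false, PySem.Dict.modify,
        PySem.Dict.getD_insert_self, PySem.Dict.insert_insert_self]
      rw [PySem.Dict.getD_of_not_contains dg _ (by simpa using h)]
  rw [h]

theorem pvDg_getD (data : List (List (String × String))) (c : String) :
    (data.foldl (fun dg item => dg.modify (pvKey item) [] (fun l => l ++ [item]))
      (PySem.Dict.mk [])).getD c []
    = data.filter (fun it => pvKey it == c) := by
  have h := PySem.Dict.getD_foldl_modify_append
      (data.map (fun it => (pvKey it, it))) (PySem.Dict.mk []) c
  rw [List.foldl_map] at h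
  rw [h]
  have he : (PySem.Dict.mk [] : PySem.Dict String (List (List (String × String)))).getD c [] = [] := rfl
  simp [List.filter_map, Function.comp_def, he]

theorem pvDg_keys (data : List (List (String × String))) :
    (data.foldl (fun dg item => dg.modify (pvKey item) [] (fun l => l ++ [item]))
      (PySem.Dict.mk [])).keys
    = PySem.Set.ofList (data.map pvKey) := by
  rw [PySem.Dict.keys_foldl_modify_key data pvKey [] (fun _ it => (· ++ [it]))]
  simp [PySem.Dict.keys, PySem.Set.update_nil_left]

-- A's flush loop with a partial batch of K - r dates still open
def pvChunkP (K : Nat) : Nat → List (List (List (String × String))) → List (List (String × String)) → List (List (List (String × String)))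
  | _, [], cb => if cb.isEmpty then [] else [cb]
  | r, g :: rs, cb => if r ≤ 1 then (cb ++ g) :: pvChunkP K K rs [] else pvChunkP K (r - 1) rs (cb ++ g)

theorem pvLoopA (dpb : Int) (dg : PySem.Dict String (List (List (String × String)))) :
    ∀ (ds : List String) (B : List (List (List (String × String))))
      (cb : List (List (String × String))) (cs : PySem.Set String),
    (∀ d ∈ ds, d ∉ cs) → ds.Nodup → cs.length < (max dpb 1).toNat →
    (let st := ds.foldl
        (fun (st : List (List (List (String × String))) × List (List (String × String)) × PySem.Set String) date =>
          let cb := st.2.1 ++ dg.getD date []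
          let cs := PySem.Set.add st.2.2 date
          if dpb ≤ (cs.length : Int)
          then (st.1 ++ [cb], [], PySem.Set.empty) else (st.1, cb, cs)) (B, cb, cs)
     if st.2.1.isEmpty then st.1 else st.1 ++ [st.2.1])
    = B ++ pvChunkP (max dpb 1).toNat ((max dpb 1).toNat - cs.length)
        (ds.map (fun d => dg.getD d [])) cb := by
  have hK : ((max dpb 1).toNat : Int) = max dpb 1 := by
    rw [Int.toNat_of_nonneg]; omega
  intro ds
  induction ds with
  | nil =>
    intro B cb cs _ _ _
    simp only [List.foldl_nil, List.map_nil, pvChunkP]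
    by_cases h : cb.isEmpty <;> simp [h]
  | cons d ds ih =>
    intro B cb cs hfresh hnd hlt
    have hd : d ∉ cs := hfresh d (by simp)
    have hlen : (PySem.Set.add cs d).length = cs.length + 1 := by
      rw [PySem.Set.add_of_not_mem hd]; simp
    simp only [List.foldl_cons, List.map_cons, pvChunkP]
    by_cases hc : dpb ≤ ((PySem.Set.add cs d).length : Int)
    · rw [if_pos hc]
      have hr : (max dpb 1).toNat - cs.length ≤ 1 := by
        rw [hlen] at hc; omega
      rw [if_pos hr]
      rw [ih (B ++ [cb ++ dg.getD d []]) [] PySem.Set.empty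
        (by intro x _; simp [PySem.Set.empty]) (hnd.of_cons)
        (by simp only [PySem.Set.empty, List.length_nil]; omega)]
      simp [PySem.Set.empty]
    · rw [if_neg hc]
      have hr : ¬ ((max dpb 1).toNat - cs.length ≤ 1) := by
        rw [hlen] at hc; omega
      rw [if_neg hr]
      have hlt' : (PySem.Set.add cs d).length < (max dpb 1).toNat := by
        rw [hlen] at hc ⊢; omega
      have hfresh' : ∀ x ∈ ds, x ∉ PySem.Set.add cs d := by
        intro x hx
        rw [PySem.Set.mem_add]
        push Not
        exact ⟨fun h => hfresh x (by simp [hx]) h,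
          fun h => (List.nodup_cons.mp hnd).1 (h ▸ hx)⟩
      rw [ih (B) (cb ++ dg.getD d []) (PySem.Set.add cs d) hfresh' hnd.of_cons hlt']
      rw [hlen]
      have hsub : (max dpb 1).toNat - (cs.length + 1) = (max dpb 1).toNat - cs.length - 1 := by
        omega
      rw [hsub]

theorem pvChunkP_spec (K : Nat) (hK : 1 ≤ K) :
    ∀ (rs : List (List (List (String × String)))) (r : Nat)
      (cb : List (List (String × String))), 1 ≤ r → r ≤ K → (∀ g ∈ rs, g ≠ []) →
    pvChunkP K r rs cb = (match rs with
      | [] => if cb.isEmpty then [] else [cb]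
      | _ :: _ => (cb ++ (rs.take r).flatten) :: pvChunk K (rs.drop r)) := by
  intro rs
  induction rs with
  | nil => intro r cb _ _ _; rfl
  | cons g rs ih =>
    intro r cb hr hrK hne
    by_cases h1 : r ≤ 1
    · have hr1 : r = 1 := by omega
      subst hr1
      simp only [pvChunkP, if_pos (by omega : (1:Nat) ≤ 1)]
      have : pvChunkP K K rs [] = pvChunk K rs := by
        rcases rs with _ | ⟨g', rs'⟩
        · simp [pvChunkP, pvChunk]
        · rw [ih K [] hK (le_refl K) (fun x hx => hne x (by simp [hx]))]
          obtain ⟨m, rfl⟩ : ∃ m, K = m + 1 := ⟨K - 1, by omega⟩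
          simp [pvChunk]
      rw [this]
      simp
    · simp only [pvChunkP, if_neg h1]
      rw [ih (r - 1) (cb ++ g) (by omega) (by omega) (fun x hx => hne x (by simp [hx]))]
      rcases rs with _ | ⟨g', rs'⟩
      · have hg : ¬ (cb ++ g).isEmpty := by
          simp [List.isEmpty_iff]
          intro _ h
          exact hne g (by simp) h
        simp only [if_neg hg]
        have ht : (List.take r [g]).flatten = g := by
          rcases r with _ | r
          · omega
          · simp
        simp [ht, List.drop_eq_nil_of_le (by simp; omega : [g].length ≤ r), pvChunk]
      · have htake : List.take r (g :: g' :: rs') = g :: List.take (r - 1) (g' :: rs') := by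
          rcases r with _ | r
          · omega
          · simp
        have hdrop : List.drop r (g :: g' :: rs') = List.drop (r - 1) (g' :: rs') := by
          rcases r with _ | r
          · omega
          · simp
        simp [htake, hdrop, List.append_assoc]

theorem pvChunkP_eq_pvChunk (K : Nat) (hK : 1 ≤ K)
    (rs : List (List (List (String × String)))) (hne : ∀ g ∈ rs, g ≠ []) :
    pvChunkP K K rs [] = pvChunk K rs := by
  rcases rs with _ | ⟨g, rs⟩
  · simp [pvChunkP, pvChunk]
  · rw [pvChunkP_spec K hK (g :: rs) K [] hK (le_refl K) hne]
    obtain ⟨m, rfl⟩ : ∃ m, K = m + 1 := ⟨K - 1, by omega⟩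
    simp [pvChunk]

-- ===== VERDICT (by name: the statement is the Claim_ definition above) =====
theorem split_data_by_days_spec : Claim_equal_split_data_by_days := by
  intro data dpb _hdom _hpre
  unfold Spec_split_data_by_days split_data_by_days split_data_by_days_alt
  simp only []
  rw [pvFoldA_eq data]
  set dgM := data.foldl (fun dg item => dg.modify (pvKey item) [] (fun l => l ++ [item]))
      (PySem.Dict.mk []) with hdgM
  have hkeys : dgM.keys = PySem.Set.ofList (data.map pvKey) := pvDg_keys data
  set ds := PySem.List.sorted dgM.keys (fun d => d) with hds
  have hnd : ds.Nodup := by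
    have hperm := PySem.List.sorted_perm (xs := dgM.keys) (key := fun d => d) (rev := false)
    exact hperm.symm.nodup (hkeys ▸ PySem.Set.nodup_ofList _)
  have hK1 : 1 ≤ (max dpb 1).toNat := by omega
  rw [pvLoopA dpb dgM ds [] [] PySem.Set.empty
      (by intro x _; simp [PySem.Set.empty]) hnd
      (by simp only [PySem.Set.empty, List.length_nil]; omega)]
  have hgd : ∀ c, dgM.getD c [] = data.filter (fun it => pvKey it == c) := by
    intro c; rw [hdgM]; exact pvDg_getD data c
  have hmap : ds.map (fun d => dgM.getD d []) = ds.map (fun d => data.filter (fun it => pvKey it == d)) := by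
    simp only [hgd]
  rw [hmap]
  have hne : ∀ g ∈ ds.map (fun d => data.filter (fun it => pvKey it == d)), g ≠ [] := by
    intro g hg
    obtain ⟨d, hd, rfl⟩ := List.mem_map.mp hg
    have : d ∈ PySem.Set.ofList (data.map pvKey) := by
      have := (PySem.List.mem_sorted _ _ _ d).mp (hds ▸ hd)
      exact hkeys ▸ this
    obtain ⟨it, hit, hkey⟩ := List.mem_map.mp ((PySem.Set.mem_ofList _ _).mp this)
    exact List.ne_nil_of_mem (List.mem_filter.mpr ⟨hit, by simp [hkey]⟩)
  simp only [PySem.Set.empty, List.length_nil, Nat.sub_zero, List.nil_append]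
  rw [pvChunkP_eq_pvChunk (max dpb 1).toNat hK1 _ hne]
  rw [hds, hkeys]
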